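-- pv_equiv track=rewrite | github.com/nabonitasen/CSXX46p | agent_code/q_learning/callbacks.py | get_distance_bucket
-- ===== SOURCE A (Python) =====
-- def get_distance_bucket(x, y, targets):
--     """
--     Categorize distance to nearest target.
--     Returns: 'very_close' (<= 2), 'close' (3-5), 'medium' (6-10), 'far' (>10)
--     """
--     if len(targets) == 0:
--         return 'none'
--
--     min_dist = min(abs(tx - x) + abs(ty - y) for tx, ty in targets)
--
--     if min_dist <= 2:
--         return 'very_close'
--     elif min_dist <= 5:
--         return 'close'
--     elif min_dist <= 10:
--         return 'medium'
--     else: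
--         return 'far'
-- ===== SOURCE B (Python) =====
-- def get_distance_bucket(x, y, targets):
--     """
--     Categorize distance to nearest target.
--     Returns: 'very_close' (<= 2), 'close' (3-5), 'medium' (6-10), 'far' (>10)
--     """
--     if len(targets) == 0:
--         return 'none'
--     # Never computes the minimum distance: instead answers staged existence
--     # queries, correct because min(d) <= t  iff  some target has d <= t.
--     for threshold, label in ((2, 'very_close'), (5, 'close'), (10, 'medium')):
--         if any(abs(tx - x) + abs(ty - y) <= threshold for tx, ty in targets):
--             return label
--     return 'far'
-- ===== Notes on version B (the rewrite author's own statement) =====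
-- stated objective: alternative
-- what changed: B never computes the minimum distance: it replaces the min-scan plus if/elif chain by staged existence queries (any target within 2, else within 5, else within 10), correct because min<=t iff some target is within t.
import Mathlib
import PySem

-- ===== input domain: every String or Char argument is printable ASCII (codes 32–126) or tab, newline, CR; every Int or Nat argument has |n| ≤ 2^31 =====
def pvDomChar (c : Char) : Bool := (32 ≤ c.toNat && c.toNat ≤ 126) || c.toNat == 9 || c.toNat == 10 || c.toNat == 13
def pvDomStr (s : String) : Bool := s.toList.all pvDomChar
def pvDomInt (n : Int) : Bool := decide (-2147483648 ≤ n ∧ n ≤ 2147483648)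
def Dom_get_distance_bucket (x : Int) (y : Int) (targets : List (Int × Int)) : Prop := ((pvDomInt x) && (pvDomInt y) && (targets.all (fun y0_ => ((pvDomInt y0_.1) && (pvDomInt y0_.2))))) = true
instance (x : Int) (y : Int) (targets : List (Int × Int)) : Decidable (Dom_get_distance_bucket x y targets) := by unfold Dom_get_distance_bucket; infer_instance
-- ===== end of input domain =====

-- B never computes the minimum distance: it answers staged existence queries
-- (any target within 2? else within 5? else within 10?), correct because
-- min of the distances ≤ t iff some target is within t (alternative algorithm, same cost).

-- ===== PORT A =====
def get_distance_bucket (x : Int) (y : Int) (targets : List (Int × Int)) : String :=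
  if targets.length = 0 then "none"
  else
    -- min(...) over a nonempty generator; getD 0 is unreachable (targets ≠ [])
    let min_dist := (PySem.List.min? (targets.map (fun p => |p.1 - x| + |p.2 - y|)) (fun d => d)).getD 0
    if min_dist ≤ 2 then "very_close"
    else if min_dist ≤ 5 then "close"
    else if min_dist ≤ 10 then "medium"
    else "far"

-- ===== PORT B =====
-- Source B's `for threshold, label in ((2,'very_close'),(5,'close'),(10,'medium'))` loop:
-- each stage is `any(...)` over the targets, returning the label on the first hit
def gdbStages (x : Int) (y : Int) (targets : List (Int × Int)) : List (Int × String) → String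
  | [] => "far"
  | (t, label) :: rest =>
    if targets.any (fun p => |p.1 - x| + |p.2 - y| ≤ t) then label
    else gdbStages x y targets rest

def get_distance_bucket_alt (x : Int) (y : Int) (targets : List (Int × Int)) : String :=
  if targets.length = 0 then "none"
  else gdbStages x y targets [(2, "very_close"), (5, "close"), (10, "medium")]

-- ===== PRECONDITION & SPEC =====
def Spec_get_distance_bucket (x : Int) (y : Int) (targets : List (Int × Int)) (out : String) : Prop := out = get_distance_bucket_alt x y targets
instance (x : Int) (y : Int) (targets : List (Int × Int)) (out : String) : Decidable (Spec_get_distance_bucket x y targets out) := by unfold Spec_get_distance_bucket; infer_instance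

-- ===== CLAIM (what is proved, stated in full; the proofs are below) =====
def Claim_equal_get_distance_bucket : Prop := ∀ (x : Int) (y : Int) (targets : List (Int × Int)), Dom_get_distance_bucket x y targets → Spec_get_distance_bucket x y targets (get_distance_bucket x y targets)

-- ===== LEMMAS AND PROOFS =====

-- the running minimum is ≤ t iff the seed or some element is ≤ t
theorem foldl_min_le (l : List Int) (a t : Int) :
    l.foldl min a ≤ t ↔ (a ≤ t ∨ ∃ b ∈ l, b ≤ t) := by
  induction l generalizing a with
  | nil => simp
  | cons h tail ih =>
    simp only [List.foldl_cons, ih, List.mem_cons]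
    constructor
    · rintro (hm | ⟨b, hb, hbt⟩)
      · rcases le_total a h with hc | hc
        · exact Or.inl (by omega)
        · exact Or.inr ⟨h, Or.inl rfl, by omega⟩
      · exact Or.inr ⟨b, Or.inr hb, hbt⟩
    · rintro (ha | ⟨b, hb | hb, hbt⟩)
      · exact Or.inl (by omega)
      · subst hb; exact Or.inl (by omega)
      · exact Or.inr ⟨b, hb, hbt⟩

-- A's min_dist compares ≤ t exactly when B's stage-t `any` fires
theorem min_le_iff_any (x y t : Int) (p : Int × Int) (rest : List (Int × Int)) :
    ((PySem.List.min? ((p :: rest).map (fun q => |q.1 - x| + |q.2 - y|)) (fun d => d)).getD 0 ≤ t)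
    ↔ ((p :: rest).any (fun q => decide (|q.1 - x| + |q.2 - y| ≤ t)) = true) := by
  simp only [List.map_cons, PySem.List.min?_id_cons, Option.getD_some, List.foldl_map,
    List.any_cons, List.any_eq_true, Bool.or_eq_true, decide_eq_true_eq]
  rw [show (rest.foldl (fun acc q => min acc (|q.1 - x| + |q.2 - y|)) (|p.1 - x| + |p.2 - y|))
        = ((rest.map (fun q => |q.1 - x| + |q.2 - y|)).foldl min (|p.1 - x| + |p.2 - y|)) by
      rw [List.foldl_map]]
  rw [foldl_min_le]
  simp

-- ===== VERDICT (by name: the statement is the Claim_ definition above) =====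
theorem get_distance_bucket_spec : Claim_equal_get_distance_bucket := by
  intro x y targets _
  unfold Spec_get_distance_bucket get_distance_bucket get_distance_bucket_alt
  cases targets with
  | nil => rfl
  | cons p rest =>
    simp only [List.length_cons, Nat.succ_ne_zero, if_false, gdbStages]
    simp only [min_le_iff_any x y 2 p rest, min_le_iff_any x y 5 p rest,
      min_le_iff_any x y 10 p rest]
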